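-- pv_equiv track=rewrite | github.com/Tony-sama/pylfit | tests/examples/sequences_learning/sequence_properties.py | alt_response
-- ===== SOURCE A (Python) =====
-- def alt_response(events, sequence):
--     features = []
--     values = []
--     for ei in sorted(events):
--         for ej in sorted(events):
--             if(ei == ej):
--                 continue
--             features.append("alt_response_"+str(ei)+"_"+str(ej))
--
--             value = True
--             expect_ej = False
--             for e in sequence:
--                 if(expect_ej and e == ei):
--                     value = False
--                     break
--
--                 if(e == ei):
--                     expect_ej = True
--                     continue
--
--                 if(e == ej):
--                     expect_ej = False
--
--             if(expect_ej):
--                 value = False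
--
--             values.append(value)
--     return features, values
-- ===== SOURCE B (Python) =====
-- def _alt_check(expect, pi, pj):
--     # two-pointer merge of the position lists of ei (pi) and ej (pj)
--     i = j = 0
--     while i < len(pi) or j < len(pj):
--         if j >= len(pj) or (i < len(pi) and pi[i] < pj[j]):
--             if expect:
--                 return False
--             expect = True
--             i += 1
--         else:
--             expect = False
--             j += 1
--     return not expect
--
--
-- def alt_response(events, sequence):
--     pos = {}
--     for i, e in enumerate(sequence):
--         pos.setdefault(e, []).append(i)
--     features = []
--     values = []
--     se = sorted(events)
--     for ei in se:
--         for ej in se: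
--             if ei == ej:
--                 continue
--             features.append("alt_response_" + str(ei) + "_" + str(ej))
--             values.append(_alt_check(False, pos.get(ei, []), pos.get(ej, [])))
--     return features, values
-- ===== Notes on version B (the rewrite author's own statement) =====
-- stated objective: faster
-- what changed: B builds a value->positions index of the sequence in one pass and decides each pair (ei,ej) by a two-pointer merge of the two occurrence lists, instead of A's full rescan of the sequence for every ordered pair.
import Mathlib
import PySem

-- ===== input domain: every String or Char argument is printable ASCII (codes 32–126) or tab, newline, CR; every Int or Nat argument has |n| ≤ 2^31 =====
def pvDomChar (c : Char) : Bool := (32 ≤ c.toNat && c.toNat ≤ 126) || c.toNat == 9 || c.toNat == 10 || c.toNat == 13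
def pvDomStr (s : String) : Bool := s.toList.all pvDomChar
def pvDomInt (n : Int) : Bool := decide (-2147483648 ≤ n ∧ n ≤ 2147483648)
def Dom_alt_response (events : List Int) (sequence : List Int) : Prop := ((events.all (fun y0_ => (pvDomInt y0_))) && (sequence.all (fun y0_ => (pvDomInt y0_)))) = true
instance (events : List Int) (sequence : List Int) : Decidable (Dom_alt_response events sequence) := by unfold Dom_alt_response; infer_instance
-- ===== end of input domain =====

-- B replaces A's full rescan of the sequence per event pair by a one-pass value->positions
-- index plus a two-pointer merge of the two occurrence lists per pair (objective: faster).

-- ===== PORT A =====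
-- A's inner 'for e in sequence' loop with break: state 'none' = broken (value=False),
-- 'some expect_ej' = still running with value=True.
def stepA (ei ej : Int) (st : Option Bool) (e : Int) : Option Bool :=
  match st with
  | none => none
  | some expect_ej =>
    if expect_ej && e == ei then none
    else if e == ei then some true
    else if e == ej then some false
    else some expect_ej

def scanA (ei ej : Int) (sequence : List Int) : Bool :=
  match sequence.foldl (stepA ei ej) (some false) with
  | none => false                 -- loop broke: value = False
  | some expect_ej => !expect_ej  -- value stays True unless expect_ej at the end

def alt_response (events : List Int) (sequence : List Int) : List String × List Bool :=
  (PySem.List.sorted events (fun x => x) false).foldl (fun acc ei =>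
    (PySem.List.sorted events (fun x => x) false).foldl (fun acc2 ej =>
      if ei = ej then acc2
      else (acc2.1 ++ ["alt_response_" ++ PySem.Int.toStr ei ++ "_" ++ PySem.Int.toStr ej],
            acc2.2 ++ [scanA ei ej sequence])) acc)
    ([], [])

-- ===== PORT B =====
-- pos = {}; for i, e in enumerate(sequence): pos.setdefault(e, []).append(i)
def buildPos (sequence : List Int) : PySem.Dict Int (List Int) :=
  (PySem.List.enumerate sequence 0).foldl
    (fun d p => d.modify p.2 [] (fun l => l ++ [p.1])) PySem.Dict.empty

-- _alt_check: two-pointer merge over the two position lists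
def checkMerge : Bool → List Int → List Int → Bool
  | exp, [], [] => !exp
  | exp, _ :: pi, [] => if exp then false else checkMerge true pi []
  | _, [], _ :: pj => checkMerge false [] pj
  | exp, a :: pi, b :: pj =>
      if a < b then (if exp then false else checkMerge true pi (b :: pj))
      else checkMerge false (a :: pi) pj
termination_by _ pi pj => pi.length + pj.length

def alt_response_alt (events : List Int) (sequence : List Int) : List String × List Bool :=
  let pos := buildPos sequence
  let se := PySem.List.sorted events (fun x => x) false
  se.foldl (fun acc ei =>
    se.foldl (fun acc2 ej =>
      if ei = ej then acc2
      else (acc2.1 ++ ["alt_response_" ++ PySem.Int.toStr ei ++ "_" ++ PySem.Int.toStr ej],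
            acc2.2 ++ [checkMerge false (pos.getD ei []) (pos.getD ej [])])) acc)
    ([], [])

-- ===== PRECONDITION & SPEC =====
def Spec_alt_response (events : List Int) (sequence : List Int) (out : List String × List Bool) : Prop := out = alt_response_alt events sequence
instance (events : List Int) (sequence : List Int) (out : List String × List Bool) : Decidable (Spec_alt_response events sequence out) := by unfold Spec_alt_response; infer_instance

-- ===== CLAIM (what is proved, stated in full; the proofs are below) =====
def Claim_equal_alt_response : Prop := ∀ (events : List Int) (sequence : List Int), Dom_alt_response events sequence → Spec_alt_response events sequence (alt_response events sequence)

-- ===== LEMMAS AND PROOFS =====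

-- positions of v in s, indices starting at i (reference specification)
def posRec (v : Int) (s : List Int) (i : Int) : List Int :=
  match s with
  | [] => []
  | x :: t => if x = v then i :: posRec v t (i + 1) else posRec v t (i + 1)

lemma posRec_ge (v : Int) (s : List Int) (i : Int) : ∀ p ∈ posRec v s i, i ≤ p := by
  induction s generalizing i with
  | nil => simp [posRec]
  | cons x t ih =>
    intro p hp
    simp only [posRec] at hp
    split at hp
    · rcases List.mem_cons.mp hp with h | h
      · omega
      · have := ih (i + 1) p h; omega
    · have := ih (i + 1) p hp; omega

lemma buildPos_getD (s : List Int) (v : Int) :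
    (buildPos s).getD v [] = posRec v s 0 := by
  suffices h : ∀ (i : Int) (d : PySem.Dict Int (List Int)),
      ((PySem.List.enumerate s i).foldl
        (fun d p => d.modify p.2 [] (fun l => l ++ [p.1])) d).getD v []
      = d.getD v [] ++ posRec v s i by
    have := h 0 PySem.Dict.empty
    simpa [buildPos, PySem.Dict.getD_empty] using this
  induction s with
  | nil => intro i d; simp [PySem.List.enumerate_nil, posRec]
  | cons x t ih =>
    intro i d
    rw [PySem.List.enumerate_cons]
    simp only [List.foldl_cons]
    rw [ih]
    rw [PySem.Dict.getD_modify]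
    by_cases hv : x = v
    · simp [posRec, hv]
    · simp [posRec, hv, Ne.symm hv]

lemma foldl_stepA_none (ei ej : Int) (s : List Int) :
    s.foldl (stepA ei ej) none = none := by
  induction s with
  | nil => rfl
  | cons x t ih => simpa [stepA] using ih

-- the heart: the two-pointer merge over the position lists replays A's scan
lemma checkMerge_eq_scan (ei ej : Int) (hne : ei ≠ ej) (s : List Int) :
    ∀ (i : Int) (exp : Bool),
      checkMerge exp (posRec ei s i) (posRec ej s i)
        = (match s.foldl (stepA ei ej) (some exp) with
           | none => false
           | some e => !e) := by
  induction s with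
  | nil => intro i exp; simp [posRec, checkMerge]
  | cons x t ih =>
    intro i exp
    by_cases hi : x = ei
    · have hj : ¬ (x = ej) := by rw [hi]; exact hne
      have hQ : posRec ej (x :: t) i = posRec ej t (i + 1) := by
        simp [posRec, hj]
      have hP : posRec ei (x :: t) i = i :: posRec ei t (i + 1) := by
        simp [posRec, hi]
      rw [hP, hQ]
      have hmerge : checkMerge exp (i :: posRec ei t (i + 1)) (posRec ej t (i + 1))
          = if exp then false else checkMerge true (posRec ei t (i + 1)) (posRec ej t (i + 1)) := by
        cases hq : posRec ej t (i + 1) with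
        | nil => simp [checkMerge]
        | cons b Q =>
          have hb : i + 1 ≤ b := posRec_ge ej t (i + 1) b (by rw [hq]; exact List.mem_cons_self ..)
          have : i < b := by omega
          simp [checkMerge, this]
      rw [hmerge]
      simp only [List.foldl_cons]
      by_cases hexp : exp
      · subst hexp
        have hst : stepA ei ej (some true) x = none := by simp [stepA, hi]
        rw [hst, foldl_stepA_none]
        simp
      · simp only [hexp]
        have hst : stepA ei ej (some false) x = some true := by simp [stepA, hi]
        rw [hst, ih (i + 1) true]
        simp
    · by_cases hj : x = ej
      · have hP : posRec ei (x :: t) i = posRec ei t (i + 1) := by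
          simp [posRec, hi]
        have hQ : posRec ej (x :: t) i = i :: posRec ej t (i + 1) := by
          simp [posRec, hj]
        rw [hP, hQ]
        have hmerge : checkMerge exp (posRec ei t (i + 1)) (i :: posRec ej t (i + 1))
            = checkMerge false (posRec ei t (i + 1)) (posRec ej t (i + 1)) := by
          cases hp : posRec ei t (i + 1) with
          | nil => simp [checkMerge]
          | cons a P =>
            have ha : i + 1 ≤ a := posRec_ge ei t (i + 1) a (by rw [hp]; exact List.mem_cons_self ..)
            have : ¬ (a < i) := by omega
            simp [checkMerge, this]
        rw [hmerge]
        simp only [List.foldl_cons]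
        have hne' : ¬ (ej = ei) := fun h => hne h.symm
        have hst : stepA ei ej (some exp) x = some false := by
          simp [stepA, hj, hne']
        rw [hst, ih (i + 1) false]
      · have hP : posRec ei (x :: t) i = posRec ei t (i + 1) := by
          simp [posRec, hi]
        have hQ : posRec ej (x :: t) i = posRec ej t (i + 1) := by
          simp [posRec, hj]
        rw [hP, hQ]
        simp only [List.foldl_cons]
        have hst : stepA ei ej (some exp) x = some exp := by
          simp [stepA, hi, hj]
        rw [hst, ih (i + 1) exp]

lemma pair_value_eq (ei ej : Int) (hne : ei ≠ ej) (s : List Int) :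
    checkMerge false ((buildPos s).getD ei []) ((buildPos s).getD ej []) = scanA ei ej s := by
  rw [buildPos_getD, buildPos_getD, scanA]
  exact checkMerge_eq_scan ei ej hne s 0 false

-- ===== VERDICT (by name: the statement is the Claim_ definition above) =====
theorem alt_response_spec : Claim_equal_alt_response := by
  intro events sequence _
  unfold Spec_alt_response alt_response alt_response_alt
  simp only []
  congr 1
  funext acc ei
  congr 1
  funext acc2 ej
  by_cases h : ei = ej
  · simp [h]
  · simp only [h, if_false]
    rw [pair_value_eq ei ej h sequence]
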